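-- pv_equiv track=rewrite | github.com/RodolfoloLo/majspirit | backend/utils/hu.py | is_thirteen_orphans
-- ===== SOURCE A (Python) =====
-- from collections import Counter
--
-- TERMINAL_OR_HONOR_TILES = {
--     "m1",
--     "m9",
--     "s1",
--     "s9",
--     "p1",
--     "p9",
--     "east",
--     "south",
--     "west",
--     "north",
--     "white",
--     "green",
--     "red",
-- }
--
-- def is_thirteen_orphans(tiles14: list[str]) -> bool:
--     if len(tiles14) != 14:
--         return False
--     counter = Counter(tiles14)
--
--     # Must contain all 13 terminal/honor tiles at least once.
--     if set(counter.keys()) - TERMINAL_OR_HONOR_TILES: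
--         return False
--     if not TERMINAL_OR_HONOR_TILES.issubset(set(counter.keys())):
--         return False
--
--     # Exactly one of them appears twice and all others once.
--     pair_count = 0
--     for tile in TERMINAL_OR_HONOR_TILES:
--         cnt = counter.get(tile, 0)
--         if cnt == 2:
--             pair_count += 1
--         elif cnt != 1:
--             return False
--     return pair_count == 1
-- ===== SOURCE B (Python) =====
-- TERMINAL_OR_HONOR_TILES = {
--     "m1", "m9", "s1", "s9", "p1", "p9",
--     "east", "south", "west", "north", "white", "green", "red",
-- }
--
-- def is_thirteen_orphans(tiles14: list[str]) -> bool: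
--     # 14 tiles drawn only from the 13 orphans with all 13 present force exactly one pair.
--     return len(tiles14) == 14 and set(tiles14) == TERMINAL_OR_HONOR_TILES
-- ===== Notes on version B (the rewrite author's own statement) =====
-- stated objective: simpler
-- what changed: Replaces the Counter build, the two subset checks and the pair-counting loop by a single set-equality test: 14 tiles whose set equals the 13 orphan tiles necessarily contain exactly one pair (pigeonhole), so no counting is needed.
import Mathlib
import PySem

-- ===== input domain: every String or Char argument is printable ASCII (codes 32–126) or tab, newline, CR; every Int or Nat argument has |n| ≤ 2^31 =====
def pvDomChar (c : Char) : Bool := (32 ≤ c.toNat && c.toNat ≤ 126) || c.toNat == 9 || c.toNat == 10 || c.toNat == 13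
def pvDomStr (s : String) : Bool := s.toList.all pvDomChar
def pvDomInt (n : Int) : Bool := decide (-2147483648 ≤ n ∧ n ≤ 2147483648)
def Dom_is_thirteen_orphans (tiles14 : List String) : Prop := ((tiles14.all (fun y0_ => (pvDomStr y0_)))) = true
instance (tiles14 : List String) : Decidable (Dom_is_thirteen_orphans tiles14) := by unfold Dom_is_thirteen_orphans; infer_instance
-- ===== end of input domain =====

-- B replaces A's Counter build, two subset checks and pair-counting loop by one
-- set-equality test (len == 14 forces exactly one pair by pigeonhole); objective: simpler.

-- ===== PORT A =====
-- The module constant: a 13-element set of tile names (already distinct, insertion order kept).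
def TERMINAL_OR_HONOR_TILES : PySem.Set String :=
  PySem.Set.ofList ["m1","m9","s1","s9","p1","p9","east","south","west","north","white","green","red"]

-- the 'for tile in TERMINAL_OR_HONOR_TILES' loop with its early 'return False';
-- Python iterates the set in hash order, but the result is order-independent
-- (a conjunction of per-tile tests plus a count), so iterating the literal order is exact.
def countLoopA (counter : PySem.Dict String Int) : List String → Int → Bool
  | [], pair_count => pair_count == 1
  | tile :: rest, pair_count =>
      let cnt := counter.getD tile 0
      if cnt == 2 then countLoopA counter rest (pair_count + 1)
      else if cnt != 1 then false
      else countLoopA counter rest pair_count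

def is_thirteen_orphans (tiles14 : List String) : Bool :=
  if tiles14.length ≠ 14 then false
  else
    let counter := PySem.Dict.counter tiles14
    if PySem.Set.diff (PySem.Set.ofList counter.keys) TERMINAL_OR_HONOR_TILES ≠ [] then false
    else if ¬ (PySem.Set.issubset TERMINAL_OR_HONOR_TILES (PySem.Set.ofList counter.keys) = true) then false
    else countLoopA counter TERMINAL_OR_HONOR_TILES 0

-- ===== PORT B =====
def is_thirteen_orphans_alt (tiles14 : List String) : Bool :=
  tiles14.length == 14 && PySem.Set.equal (PySem.Set.ofList tiles14) TERMINAL_OR_HONOR_TILES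

-- ===== PRECONDITION & SPEC =====
def Spec_is_thirteen_orphans (tiles14 : List String) (out : Bool) : Prop := out = is_thirteen_orphans_alt tiles14
instance (tiles14 : List String) (out : Bool) : Decidable (Spec_is_thirteen_orphans tiles14 out) := by unfold Spec_is_thirteen_orphans; infer_instance

-- ===== CLAIM (what is proved, stated in full; the proofs are below) =====
def Claim_equal_is_thirteen_orphans : Prop := ∀ (tiles14 : List String), Dom_is_thirteen_orphans tiles14 → Spec_is_thirteen_orphans tiles14 (is_thirteen_orphans tiles14)

-- ===== LEMMAS AND PROOFS =====

-- The loop as a closed expression: every visited count is 1 or 2, and pair_count totals 1.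
theorem countLoopA_eq (c : PySem.Dict String Int) (L : List String) (pc : Int) :
    countLoopA c L pc =
      (L.all (fun t => c.getD t 0 == 1 || c.getD t 0 == 2) &&
       (pc + (L.countP (fun t => c.getD t 0 == 2) : Int) == 1)) := by
  induction L generalizing pc with
  | nil => simp [countLoopA]
  | cons t rest ih =>
      simp only [countLoopA, List.all_cons, List.countP_cons]
      by_cases h2 : c.getD t 0 = 2
      · simp [h2, ih, add_comm, add_assoc]
      · by_cases h1 : c.getD t 0 = 1
        · simp [h1, ih]
        · simp [h1, h2]

-- all elements ≥ 1 bounds the sum below by the length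
theorem sum_ge_length (cs : List Nat) (h1 : ∀ c ∈ cs, 1 ≤ c) : cs.length ≤ cs.sum := by
  induction cs with
  | nil => simp
  | cons d tl ih =>
      simp only [List.sum_cons, List.length_cons]
      have := h1 d (by simp)
      have := ih (fun x hx => h1 x (by simp [hx]))
      omega

theorem all_eq_one (cs : List Nat) (h1 : ∀ c ∈ cs, 1 ≤ c) (h2 : cs.sum = cs.length) :
    ∀ d ∈ cs, d = 1 := by
  induction cs with
  | nil => simp
  | cons d tl ih =>
      simp only [List.sum_cons, List.length_cons] at h2
      have hd1 : 1 ≤ d := h1 d (by simp)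
      have htl := sum_ge_length tl (fun x hx => h1 x (by simp [hx]))
      have hd : d = 1 := by omega
      intro x hx
      rcases List.mem_cons.mp hx with h | h
      · omega
      · exact ih (fun y hy => h1 y (by simp [hy])) (by omega) x h

-- all counts ≥ 1, sum = length + 1  ⇒  every count is 1 or 2, exactly one is 2
theorem pigeon (cs : List Nat) (h1 : ∀ c ∈ cs, 1 ≤ c) (h2 : cs.sum = cs.length + 1) :
    (∀ c ∈ cs, c = 1 ∨ c = 2) ∧ cs.countP (fun c => c == 2) = 1 := by
  induction cs with
  | nil => simp at h2
  | cons c rest ih =>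
      have hlen := sum_ge_length rest (fun x hx => h1 x (by simp [hx]))
      have hc1 : 1 ≤ c := h1 c (by simp)
      simp only [List.sum_cons, List.length_cons] at h2
      by_cases hc : c = 2
      · have hall := all_eq_one rest (fun x hx => h1 x (by simp [hx])) (by omega)
        refine ⟨?_, ?_⟩
        · intro d hd
          rcases List.mem_cons.mp hd with h | h
          · right; omega
          · left; exact hall d h
        · have : rest.countP (fun c => c == 2) = 0 := by
            rw [List.countP_eq_zero]
            intro d hd
            simp [hall d hd]
          simp [hc, this]
      · have hc' : c = 1 := by omega
        have hrest := ih (fun x hx => h1 x (by simp [hx])) (by omega)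
        refine ⟨?_, ?_⟩
        · intro d hd
          rcases List.mem_cons.mp hd with h | h
          · left; omega
          · exact hrest.1 d h
        · simp [hc', hrest.2]

-- diff s t is empty iff s ⊆ t (memberwise)
theorem diff_eq_nil_iff (s t : PySem.Set String) :
    PySem.Set.diff s t = [] ↔ ∀ x ∈ s, x ∈ t := by
  constructor
  · intro h x hx
    by_contra hxt
    have hmem : x ∈ PySem.Set.diff s t := (PySem.Set.mem_diff s t x).mpr ⟨hx, hxt⟩
    rw [h] at hmem
    exact (List.not_mem_nil).elim hmem
  · intro h
    rw [List.eq_nil_iff_forall_not_mem]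
    intro x hx
    have hm := (PySem.Set.mem_diff s t x).mp hx
    exact hm.2 (h x hm.1)

theorem keys_counter_mem (tiles : List String) (x : String) :
    x ∈ (PySem.Dict.counter tiles : PySem.Dict String Int).keys ↔ x ∈ tiles := by
  rw [PySem.Dict.keys_counter tiles]
  exact PySem.Set.mem_ofList _ _

-- ===== VERDICT (by name: the statement is the Claim_ definition above) =====
theorem is_thirteen_orphans_spec : Claim_equal_is_thirteen_orphans := by
  intro tiles _
  unfold Spec_is_thirteen_orphans is_thirteen_orphans is_thirteen_orphans_alt
  by_cases hlen : tiles.length = 14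
  · rw [if_neg (show ¬ tiles.length ≠ 14 from by simp [hlen])]
    simp only [hlen, beq_self_eq_true, Bool.true_and]
    set c := (PySem.Dict.counter tiles : PySem.Dict String Int) with hc
    have hkeys : ∀ x, x ∈ (PySem.Set.ofList c.keys : PySem.Set String) ↔ x ∈ tiles := by
      intro x; rw [PySem.Set.mem_ofList _ x]; exact keys_counter_mem tiles x
    by_cases heq : PySem.Set.equal (PySem.Set.ofList tiles) TERMINAL_OR_HONOR_TILES = true
    · -- sets agree: both guards pass and the loop returns true
      have hmem : ∀ x, x ∈ (PySem.Set.ofList tiles : PySem.Set String) ↔ x ∈ TERMINAL_OR_HONOR_TILES :=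
        (PySem.Set.equal_iff _ _).mp heq
      have hmem' : ∀ x, x ∈ tiles ↔ x ∈ TERMINAL_OR_HONOR_TILES := by
        intro x; rw [← PySem.Set.mem_ofList tiles x]; exact hmem x
      have hdiff : PySem.Set.diff (PySem.Set.ofList c.keys) TERMINAL_OR_HONOR_TILES = [] := by
        rw [diff_eq_nil_iff]
        intro x hx
        exact (hmem' x).mp ((hkeys x).mp hx)
      have hsub : PySem.Set.issubset TERMINAL_OR_HONOR_TILES (PySem.Set.ofList c.keys) = true := by
        rw [PySem.Set.issubset_iff]
        intro x hx
        exact (hkeys x).mpr ((hmem' x).mpr hx)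
      rw [if_neg (by simp [hdiff]), if_neg (by simp [hsub]), heq]
      -- now the loop
      rw [countLoopA_eq]
      -- counts over the 13 orphan tiles
      have hcount : ∀ t : String, c.getD t 0 = (tiles.count t : Int) := by
        intro t; rw [hc]; exact PySem.Dict.getD_counter tiles t
      have hTnodup : (TERMINAL_OR_HONOR_TILES : List String).Nodup := by
        unfold TERMINAL_OR_HONOR_TILES; exact PySem.Set.nodup_ofList _
      -- permutation with tiles.dedup gives the sum of counts
      have hperm : (TERMINAL_OR_HONOR_TILES : List String).Perm tiles.dedup := by
        apply (List.perm_ext_iff_of_nodup hTnodup (List.nodup_dedup tiles)).mpr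
        intro x
        rw [List.mem_dedup]
        exact ((hmem' x).symm)
      have hsum : ((TERMINAL_OR_HONOR_TILES : List String).map (fun t => tiles.count t)).sum = 14 := by
        have := (hperm.map (fun t => tiles.count t)).sum_eq
        rw [this, List.sum_map_count_dedup_eq_length, hlen]
      have hTlen : (TERMINAL_OR_HONOR_TILES : List String).length = 13 := by decide
      have hall1 : ∀ t ∈ (TERMINAL_OR_HONOR_TILES : List String), 1 ≤ tiles.count t := by
        intro t ht
        exact List.count_pos_iff.mpr ((hmem' t).mpr ht)
      have hp := pigeon ((TERMINAL_OR_HONOR_TILES : List String).map (fun t => tiles.count t))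
        (by intro x hx; rcases List.mem_map.mp hx with ⟨t, ht, rfl⟩; exact hall1 t ht)
        (by rw [hsum, List.length_map, hTlen])
      refine (Bool.and_eq_true _ _).mpr ⟨?_, ?_⟩
      · rw [List.all_eq_true]
        intro t ht
        have := hp.1 (tiles.count t) (List.mem_map.mpr ⟨t, ht, rfl⟩)
        rcases this with h | h
        · simp [hcount, h]
        · simp [hcount, h]
      · have hcp : (TERMINAL_OR_HONOR_TILES : List String).countP (fun t => c.getD t 0 == 2) = 1 := by
          have : (fun t : String => c.getD t 0 == 2) = fun t => ((tiles.count t : Nat) == 2) := by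
            funext t; rw [hcount]
            by_cases h : tiles.count t = 2 <;> simp [h] <;> omega
          rw [this]
          have := hp.2
          rw [List.countP_map] at this
          convert this using 2
        simp [hcp]
    · -- sets differ: B is false; one of A's guards fires or the loop fails — show A false
      simp only [heq]
      have hne : ¬ ∀ x, x ∈ tiles ↔ x ∈ TERMINAL_OR_HONOR_TILES := by
        intro h
        apply heq
        rw [PySem.Set.equal_iff]
        intro x
        rw [PySem.Set.mem_ofList _ x]
        exact h x
      by_cases hdiff : PySem.Set.diff (PySem.Set.ofList c.keys) TERMINAL_OR_HONOR_TILES = []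
      · rw [if_neg (by simp [hdiff])]
        have hfwd : ∀ x ∈ tiles, x ∈ TERMINAL_OR_HONOR_TILES := by
          intro x hx
          exact (diff_eq_nil_iff _ _).mp hdiff x ((hkeys x).mpr hx)
        have hsub : ¬ PySem.Set.issubset TERMINAL_OR_HONOR_TILES (PySem.Set.ofList c.keys) = true := by
          intro h
          apply hne
          intro x
          exact ⟨hfwd x, fun hx => (hkeys x).mp ((PySem.Set.issubset_iff _ _).mp h x hx)⟩
        rw [if_pos (by exact hsub)]
      · rw [if_pos (by exact hdiff)]
  · simp [hlen]
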